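-- pv_equiv track=rewrite | github.com/alanwilter/acpype | amber21-11_os/bin/OptC4.py | get_typ_dict
-- ===== SOURCE A (Python) =====
-- def get_typ_dict(typinds, typs):
--     #Key is the ATOM_TYPE_INDEX, value is the AMBER_ATOM_TYPE
--     typdict = {}
--     for i in range(0, len(typinds)):
--         if typinds[i] not in list(typdict.keys()):
--             typdict[typinds[i]] = [typs[i]]
--         elif typs[i] in typdict[typinds[i]]:
--             continue
--         else:
--             typdict[typinds[i]].append(typs[i])
--     return typdict
-- ===== SOURCE B (Python) =====
-- def get_typ_dict(typinds, typs):
--     # Collect-then-dedupe: group every type under its index in one pass,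
--     # then deduplicate each group preserving first-seen order.
--     groups = {}
--     for i, k in enumerate(typinds):
--         groups.setdefault(k, []).append(typs[i])
--     return {k: list(dict.fromkeys(v)) for k, v in groups.items()}
-- ===== Notes on version B (the rewrite author's own statement) =====
-- stated objective: faster
-- what changed: A's single loop with an inline create/skip/append three-way branch, rebuilding and scanning list(typdict.keys()) on every iteration, is replaced by a two-phase collect-then-dedupe: one pass groups all types per index with setdefault and no membership test, a second pass deduplicates each group via dict.fromkeys preserving first-seen order.
import Mathlib
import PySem

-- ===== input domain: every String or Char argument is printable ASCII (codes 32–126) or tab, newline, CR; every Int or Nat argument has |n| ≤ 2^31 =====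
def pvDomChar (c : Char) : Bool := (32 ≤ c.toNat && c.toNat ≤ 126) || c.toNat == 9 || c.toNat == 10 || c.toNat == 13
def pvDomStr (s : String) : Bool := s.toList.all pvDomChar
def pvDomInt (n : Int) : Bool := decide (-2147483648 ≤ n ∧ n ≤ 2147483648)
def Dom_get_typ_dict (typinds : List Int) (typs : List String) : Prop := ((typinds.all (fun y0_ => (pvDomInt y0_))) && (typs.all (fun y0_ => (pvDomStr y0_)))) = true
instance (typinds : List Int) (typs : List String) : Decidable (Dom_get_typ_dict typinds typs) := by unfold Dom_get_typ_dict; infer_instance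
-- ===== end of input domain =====

-- B replaces A's inline create/skip/append loop (which rescans list(typdict.keys()) each iteration) by a two-phase collect-then-dedupe.

-- ===== PORT A =====
-- literal port of A's loop over range(len(typinds)); pyGetD's defaults are only
-- reached outside Pre_ (typs shorter than typinds), where Python raises IndexError
def get_typ_dict (typinds : List Int) (typs : List String) : List (Int × List String) :=
  ((PySem.List.pyRange 0 (typinds.length : Int) 1).foldl
    (fun d i =>
      let k := PySem.List.pyGetD typinds i 0
      let t := PySem.List.pyGetD typs i ""
      if d.contains k = false then d.insert k [t]
      else if (d.getD k []).contains t then d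
      else d.insert k (d.getD k [] ++ [t]))
    (PySem.Dict.empty : PySem.Dict Int (List String))).items

-- ===== PORT B =====
-- phase 1: group all types per index over enumerate(typinds) (typs[i] raises like A
-- when typs is shorter, outside Pre_); phase 2: dedup each group (dict.fromkeys order)
def get_typ_dict_alt (typinds : List Int) (typs : List String) : List (Int × List String) :=
  (((PySem.List.enumerate typinds 0).foldl
      (fun d p => d.modify p.2 [] (fun v => v ++ [PySem.List.pyGetD typs p.1 ""]))
      (PySem.Dict.empty : PySem.Dict Int (List String))).items).map
    (fun p => (p.1, PySem.List.dedup p.2))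

-- ===== PRECONDITION & SPEC =====
-- A indexes typs[i] for every i < len(typinds): it raises IndexError when typs is shorter
def Pre_get_typ_dict (typinds : List Int) (typs : List String) : Prop :=
  typinds.length ≤ typs.length
instance (typinds : List Int) (typs : List String) : Decidable (Pre_get_typ_dict typinds typs) := by unfold Pre_get_typ_dict; infer_instance
def pvWitness_get_typ_dict : List Int × List String := ([1, 2, 1, 2], ["CA", "HB", "CA", "CA"])

def Spec_get_typ_dict (typinds : List Int) (typs : List String) (out : List (Int × List String)) : Prop := out = get_typ_dict_alt typinds typs
instance (typinds : List Int) (typs : List String) (out : List (Int × List String)) : Decidable (Spec_get_typ_dict typinds typs out) := by unfold Spec_get_typ_dict; infer_instance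

-- ===== CLAIM (what is proved, stated in full; the proofs are below) =====
def Claim_equal_get_typ_dict : Prop := ∀ (typinds : List Int) (typs : List String), Dom_get_typ_dict typinds typs → Pre_get_typ_dict typinds typs → Spec_get_typ_dict typinds typs (get_typ_dict typinds typs)

-- ===== LEMMAS AND PROOFS =====

-- A's loop body as a step on (index, type) pairs
def pvStep (d : PySem.Dict Int (List String)) (p : Int × String) : PySem.Dict Int (List String) :=
  if d.contains p.1 = false then d.insert p.1 [p.2]
  else if (d.getD p.1 []).contains p.2 then d
  else d.insert p.1 (d.getD p.1 [] ++ [p.2])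

-- value-wise dedup of an items list / of a dict
def pvF (l : List (Int × List String)) : List (Int × List String) :=
  l.map (fun p => (p.1, PySem.List.dedup p.2))
def pvFD (d : PySem.Dict Int (List String)) : PySem.Dict Int (List String) := ⟨pvF d.items⟩

theorem pvF_get? (l : List (Int × List String)) (k : Int) :
    (PySem.Dict.mk (pvF l)).get? k = ((PySem.Dict.mk l).get? k).map PySem.List.dedup := by
  induction l with
  | nil => rfl
  | cons p rest ih =>
    obtain ⟨a, b⟩ := p
    simp only [pvF, List.map_cons] at *
    rw [PySem.Dict.get?_mk_cons, PySem.Dict.get?_mk_cons]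
    by_cases h : (a == k) = true
    · simp [h]
    · rw [if_neg h, if_neg h]; exact ih

theorem pvFD_get? (d : PySem.Dict Int (List String)) (k : Int) :
    (pvFD d).get? k = (d.get? k).map PySem.List.dedup := pvF_get? d.items k

theorem pvFD_contains (d : PySem.Dict Int (List String)) (k : Int) :
    (pvFD d).contains k = d.contains k := by
  rw [PySem.Dict.contains_eq_isSome_get?, PySem.Dict.contains_eq_isSome_get?, pvFD_get?]
  cases d.get? k <;> rfl

theorem pvFD_keys (d : PySem.Dict Int (List String)) : (pvFD d).keys = d.keys := by
  simp [pvFD, pvF, PySem.Dict.keys]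

theorem pvFD_insert (d : PySem.Dict Int (List String)) (k : Int) (v : List String) :
    pvFD (d.insert k v) = (pvFD d).insert k (PySem.List.dedup v) := by
  apply PySem.Dict.ext
  by_cases h : d.contains k = true
  · rw [show (pvFD (d.insert k v)).items = pvF (d.insert k v).items from rfl,
      PySem.Dict.items_insert_of_contains d v h,
      PySem.Dict.items_insert_of_contains (pvFD d) (PySem.List.dedup v) (by rw [pvFD_contains]; exact h)]
    show (List.map _ d.items).map _ = (pvF d.items).map _
    rw [List.map_map, pvF, List.map_map]
    apply List.map_congr_left
    intro p _
    by_cases hk : p.1 = k <;> simp [hk]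
  · have h' : d.contains k = false := by simpa using h
    rw [show (pvFD (d.insert k v)).items = pvF (d.insert k v).items from rfl,
      PySem.Dict.items_insert_of_not_contains d v h',
      PySem.Dict.items_insert_of_not_contains (pvFD d) (PySem.List.dedup v) (by rw [pvFD_contains]; exact h')]
    simp [pvFD, pvF, PySem.List.dedup_eq_ofList]

theorem pv_insert_self (d : PySem.Dict Int (List String)) (k : Int) (v : List String)
    (hnd : d.keys.Nodup) (hv : d.get? k = some v) : d.insert k v = d := by
  have hc : d.contains k = true := by
    rw [PySem.Dict.contains_eq_isSome_get?, hv]; rfl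
  apply PySem.Dict.ext
  rw [PySem.Dict.items_insert_of_contains d v hc]
  conv_rhs => rw [← List.map_id d.items]
  apply List.map_congr_left
  intro p hp
  obtain ⟨p1, p2⟩ := p
  by_cases hk : p1 = k
  · have := PySem.Dict.get?_of_mem_items d hp hnd
    rw [hk, hv] at this
    have hv2 : p2 = v := by injection this.symm
    simp [hk, hv2]
  · simp [hk]

theorem pvStep_comm (d : PySem.Dict Int (List String)) (p : Int × String)
    (hnd : d.keys.Nodup) :
    pvStep (pvFD d) p = pvFD (d.insert p.1 (d.getD p.1 [] ++ [p.2])) := by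
  rw [pvFD_insert, PySem.List.dedup_eq_ofList, PySem.Set.ofList_append_singleton]
  unfold pvStep
  rw [pvFD_contains]
  by_cases hc : d.contains p.1 = true
  · obtain ⟨v, hv⟩ : ∃ v, d.get? p.1 = some v := by
      rw [PySem.Dict.contains_eq_isSome_get?] at hc
      exact Option.isSome_iff_exists.mp hc
    have hgd : d.getD p.1 [] = v := PySem.Dict.getD_of_get?_eq_some d [] hv
    have hgdF : (pvFD d).getD p.1 [] = PySem.List.dedup v := by
      rw [PySem.Dict.getD_eq_get?_getD, pvFD_get?, hv]; rfl
    rw [hgd]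
    by_cases hm : p.2 ∈ v
    · have hmd : p.2 ∈ PySem.Set.ofList v := (PySem.Set.mem_ofList v p.2).mpr hm
      rw [PySem.Set.add_of_mem hmd, ← PySem.List.dedup_eq_ofList]
      have hcon : ((pvFD d).getD p.1 []).contains p.2 = true := by
        rw [hgdF]
        simpa [PySem.List.dedup_eq_ofList] using hmd
      rw [if_neg (by simp [hc]), if_pos hcon]
      exact (pv_insert_self (pvFD d) p.1 (PySem.List.dedup v)
        (by rw [pvFD_keys] at *; exact hnd) (by rw [pvFD_get?, hv]; rfl)).symm
    · have hmd : p.2 ∉ PySem.Set.ofList v := fun h => hm ((PySem.Set.mem_ofList v p.2).mp h)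
      rw [PySem.Set.add_of_not_mem hmd, ← PySem.List.dedup_eq_ofList]
      have hcon : ((pvFD d).getD p.1 []).contains p.2 = false := by
        rw [hgdF]
        simp only [PySem.List.dedup_eq_ofList]
        simpa using hmd
      rw [if_neg (by simp [hc]), if_neg (by rw [hcon]; exact Bool.false_ne_true), hgdF, PySem.List.dedup_eq_ofList]
  · have hc' : d.contains p.1 = false := Bool.eq_false_iff.mpr hc
    have hgd : d.getD p.1 [] = [] := PySem.Dict.getD_of_not_contains d [] hc'
    rw [hgd]
    simp [hc']

theorem pv_invariant (l : List (Int × String)) (d : PySem.Dict Int (List String))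
    (hnd : d.keys.Nodup) :
    l.foldl pvStep (pvFD d)
      = pvFD (l.foldl (fun d p => d.insert p.1 (d.getD p.1 [] ++ [p.2])) d) := by
  induction l generalizing d with
  | nil => rfl
  | cons p rest ih =>
    simp only [List.foldl_cons]
    rw [pvStep_comm d p hnd]
    exact ih _ (PySem.Dict.nodup_keys_insert d p.1 _ hnd)

theorem pv_main (typinds : List Int) (typs : List String) :
    get_typ_dict typinds typs = get_typ_dict_alt typinds typs := by
  unfold get_typ_dict get_typ_dict_alt
  rw [PySem.List.enumerate_eq_map_pyRange (d := 0), List.foldl_map]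
  have hA : (fun (d : PySem.Dict Int (List String)) (i : Int) =>
      let k := PySem.List.pyGetD typinds i 0
      let t := PySem.List.pyGetD typs i ""
      if d.contains k = false then d.insert k [t]
      else if (d.getD k []).contains t then d
      else d.insert k (d.getD k [] ++ [t]))
    = fun d i => pvStep d ((fun j => (PySem.List.pyGetD typinds j 0, PySem.List.pyGetD typs j "")) i) := rfl
  have hB : (fun (d : PySem.Dict Int (List String)) (i : Int) =>
      d.modify (PySem.List.pyGetD typinds i 0) [] (fun v => v ++ [PySem.List.pyGetD typs i ""]))
    = fun d i => (fun (d : PySem.Dict Int (List String)) (p : Int × String) =>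
        d.insert p.1 (d.getD p.1 [] ++ [p.2])) d
          ((fun j => (PySem.List.pyGetD typinds j 0, PySem.List.pyGetD typs j "")) i) := rfl
  rw [hA, hB]
  simp only [PySem.List.len_eq]
  have hinv := pv_invariant
    ((PySem.List.pyRange 0 (typinds.length : Int) 1).map
      (fun j => (PySem.List.pyGetD typinds j 0, PySem.List.pyGetD typs j "")))
    PySem.Dict.empty PySem.Dict.nodup_keys_empty
  rw [show pvFD PySem.Dict.empty = PySem.Dict.empty from rfl,
    List.foldl_map, List.foldl_map] at hinv
  rw [hinv]
  rfl

-- ===== VERDICT (by name: the statement is the Claim_ definition above) =====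
theorem get_typ_dict_spec : Claim_equal_get_typ_dict := by
  intro typinds typs _ _
  unfold Spec_get_typ_dict
  exact pv_main typinds typs
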